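-- pv_equiv track=rewrite | github.com/humank/genai-demo | scripts/analyze-bdd-features.py | _extract_feature_description
-- ===== SOURCE A (Python) =====
-- from typing import Dict, List, Set, Optional, Tuple
--
-- def _extract_feature_description(lines: List[str], start_index: int) -> str:
--     """Extract feature description from lines following Feature declaration"""
--     description_lines = []
--     for i in range(start_index + 1, len(lines)):
--         line = lines[i].strip()
--         if not line or line.startswith('#'):
--             continue
--         if line.startswith('@') or line.startswith('Background:') or line.startswith('Scenario'):
--             break
--         description_lines.append(line)
--     return ' '.join(description_lines)
-- ===== SOURCE B (Python) =====
-- def _extract_feature_description(lines, start_index):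
--     """Two-pass rewrite: slice the tail, find the terminator boundary, then filter."""
--     tail = lines[start_index + 1:]
--     stripped = [ln.strip() for ln in tail]
--     terminators = [i for i, s in enumerate(stripped)
--                    if s.startswith('@') or s.startswith('Background:') or s.startswith('Scenario')]
--     boundary = terminators[0] if terminators else len(stripped)
--     return ' '.join(s for s in stripped[:boundary] if s and not s.startswith('#'))
-- ===== Notes on version B (the rewrite author's own statement) =====
-- stated objective: alternative
-- what changed: A's single fused loop (index range, per-line strip, continue/break) is replaced by a staged pipeline: slice the tail, strip all lines, locate the first terminator index in a separate pass, then filter the prefix with a comprehension.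
-- outside the precondition, e.g. on _extract_feature_description(['a', 'b', 'c'], -3): A returns 'b c a b c', B returns 'b c'
import Mathlib
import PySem

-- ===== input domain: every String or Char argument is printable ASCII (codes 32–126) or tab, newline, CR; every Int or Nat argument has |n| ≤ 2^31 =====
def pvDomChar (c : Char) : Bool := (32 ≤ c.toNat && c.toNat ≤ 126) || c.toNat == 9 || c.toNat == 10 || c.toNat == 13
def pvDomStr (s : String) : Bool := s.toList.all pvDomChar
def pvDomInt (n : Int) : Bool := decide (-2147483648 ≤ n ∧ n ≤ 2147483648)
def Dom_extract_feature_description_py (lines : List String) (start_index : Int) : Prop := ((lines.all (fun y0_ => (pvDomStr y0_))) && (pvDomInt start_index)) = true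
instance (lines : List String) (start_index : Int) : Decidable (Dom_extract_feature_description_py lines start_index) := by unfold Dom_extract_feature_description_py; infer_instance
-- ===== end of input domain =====

-- B replaces A's fused scan-with-break by a staged pipeline (slice, strip, find boundary, filter): alternative decomposition, same cost.


-- ===== PORT A =====
-- the for-loop of A: iterate over the index list, strip, continue on blank/comment, break on terminator
def pvALoop (lines : List String) : List Int → List String
  | [] => []
  | i :: rest =>
    -- lines[i]: pyGet? = none is IndexError; excluded by Pre_, the default is never read there
    let line := PySem.Str.strip ((PySem.List.pyGet? lines i).getD "")
    if line == "" || PySem.Str.startswith line "#" then pvALoop lines rest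
    else if PySem.Str.startswith line "@" || PySem.Str.startswith line "Background:" || PySem.Str.startswith line "Scenario" then []
    else line :: pvALoop lines rest

def extract_feature_description_py (lines : List String) (start_index : Int) : String :=
  PySem.Str.join " " (pvALoop lines (PySem.List.pyRange (start_index + 1) (lines.length : Int) 1))

-- ===== PORT B =====
def pvIsTerminator (s : String) : Bool :=
  PySem.Str.startswith s "@" || PySem.Str.startswith s "Background:" || PySem.Str.startswith s "Scenario"

def extract_feature_description_py_alt (lines : List String) (start_index : Int) : String :=
  let tail := PySem.List.slice lines (some (start_index + 1)) none
  let stripped := tail.map PySem.Str.strip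
  let terminators := ((PySem.List.enumerate stripped 0).filter (fun p => pvIsTerminator p.2)).map (fun p => p.1)
  let boundary : Int := match terminators with | [] => (stripped.length : Int) | t :: _ => t
  PySem.Str.join " " ((PySem.List.slice stripped none (some boundary)).filter
    (fun s => !(s == "") && !PySem.Str.startswith s "#"))

-- ===== PRECONDITION & SPEC =====
-- Pre_ restricts start_index to the natural domain of a Feature-line index (-1 kept as the harmless 'start before the file' case):
-- for start_index ≤ -2 A raises IndexError or scans the list through Python's negative-index wraparound, which no caller would specify.
def Pre_extract_feature_description_py (_lines : List String) (start_index : Int) : Prop :=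
  -1 ≤ start_index
instance (lines : List String) (start_index : Int) : Decidable (Pre_extract_feature_description_py lines start_index) := by unfold Pre_extract_feature_description_py; infer_instance

def pvWitness_extract_feature_description_py : List String × Int := (["A demo feature", "", "Scenario: s"], 0)

def Spec_extract_feature_description_py (lines : List String) (start_index : Int) (out : String) : Prop := out = extract_feature_description_py_alt lines start_index
instance (lines : List String) (start_index : Int) (out : String) : Decidable (Spec_extract_feature_description_py lines start_index out) := by unfold Spec_extract_feature_description_py; infer_instance

-- ===== CLAIM (what is proved, stated in full; the proofs are below) =====
def Claim_equal_extract_feature_description_py : Prop := ∀ (lines : List String) (start_index : Int), Dom_extract_feature_description_py lines start_index → Pre_extract_feature_description_py lines start_index → Spec_extract_feature_description_py lines start_index (extract_feature_description_py lines start_index)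


-- ===== LEMMAS AND PROOFS =====

-- the common shape: one structural pass over the (already stripped) tail
def pvG : List String → List String
  | [] => []
  | s :: r =>
    if s == "" || PySem.Str.startswith s "#" then pvG r
    else if pvIsTerminator s then []
    else s :: pvG r

lemma pvTerm_not_skipped (s : String) (h : pvIsTerminator s = true) :
    (s == "" || PySem.Str.startswith s "#") = false := by
  unfold pvIsTerminator at h
  simp [PySem.Str.startswith, PySem.Chars.startswith] at *
  obtain (h | h) | h := h <;> obtain ⟨u, hu⟩ := h <;>
    exact ⟨fun hs => by simp [hs] at hu, by rw [← hu]; simp [List.isPrefixOf]⟩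

lemma pvALoop_eq_pvG (lines : List String) (k : Nat) :
    pvALoop lines (PySem.List.pyRange (k : Int) (lines.length : Int) 1)
      = pvG ((lines.drop k).map PySem.Str.strip) := by
  induction hn : lines.length - k generalizing k with
  | zero =>
    rw [PySem.List.pyRange_one_eq_nil (by omega), List.drop_of_length_le (by omega)]
    rfl
  | succ n ih =>
    have hk : k < lines.length := by omega
    rw [PySem.List.pyRange_one_cons (by exact_mod_cast hk)]
    have hdrop : lines.drop k = lines[k] :: lines.drop (k + 1) := List.drop_eq_getElem_cons hk
    have hget : PySem.List.pyGet? lines (k : Int) = some lines[k] := by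
      simp [PySem.List.pyGet?_natCast, List.getElem?_eq_getElem hk]
    have hrec : pvALoop lines (PySem.List.pyRange ((k : Int) + 1) (lines.length : Int) 1)
        = pvG ((lines.drop (k + 1)).map PySem.Str.strip) := by
      have := ih (k + 1) (by omega)
      rw [← this]; norm_num
    simp only [pvALoop, hget, Option.getD_some, hdrop, List.map_cons, pvG, pvIsTerminator, hrec]
    rfl

lemma pvBoundary_eq_findIdx (ss : List String) (s : Int) :
    (match ((PySem.List.enumerate ss s).filter (fun p => pvIsTerminator p.2)).map (fun p => p.1) with
     | [] => s + (ss.length : Int) | t :: _ => t)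
      = s + (ss.findIdx pvIsTerminator : Int) := by
  induction ss generalizing s with
  | nil => simp [PySem.List.enumerate_nil]
  | cons x r ih =>
    rw [PySem.List.enumerate_cons]
    by_cases hx : pvIsTerminator x = true
    · simp [hx, List.findIdx_cons]
    · simp only [Bool.not_eq_true] at hx
      simp only [List.filter_cons, hx, Bool.false_eq_true, if_false, List.findIdx_cons,
        Bool.cond_eq_ite]
      have hih := ih (s + 1)
      rcases hfr : ((PySem.List.enumerate r (s + 1)).filter (fun p => pvIsTerminator p.2)).map
          (fun p => p.1) with _ | ⟨t, ts⟩
      · rw [hfr] at hih ⊢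
        dsimp only at hih ⊢
        simp only [List.length_cons]
        push_cast at hih ⊢
        linarith
      · rw [hfr] at hih ⊢
        dsimp only at hih ⊢
        push_cast at hih ⊢
        omega

-- the port's literal boundary match, at start 0
lemma pvBoundary_zero (ss : List String) :
    (match ((PySem.List.enumerate ss 0).filter (fun p => pvIsTerminator p.2)).map (fun p => p.1) with
     | [] => (ss.length : Int) | t :: _ => t)
      = (ss.findIdx pvIsTerminator : Int) := by
  have h := pvBoundary_eq_findIdx ss 0
  rcases hfr : ((PySem.List.enumerate ss 0).filter (fun p => pvIsTerminator p.2)).map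
      (fun p => p.1) with _ | ⟨t, ts⟩ <;>
    rw [hfr] at h ⊢ <;> dsimp only at h ⊢ <;> linarith

-- filtering the prefix before the first terminator is pvG
lemma pvTake_filter_eq_pvG (ss : List String) :
    (ss.take (ss.findIdx pvIsTerminator)).filter (fun s => !(s == "") && !PySem.Str.startswith s "#")
      = pvG ss := by
  induction ss with
  | nil => rfl
  | cons x r ih =>
    by_cases hx : pvIsTerminator x = true
    · have hns := pvTerm_not_skipped x hx
      simp only [List.findIdx_cons, hx, Bool.cond_eq_ite, if_true, List.take_zero,
        List.filter_nil, pvG, hns, Bool.false_eq_true, if_false]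
    · simp only [Bool.not_eq_true] at hx
      simp only [List.findIdx_cons, Bool.cond_eq_ite, Bool.false_eq_true, if_false,
        List.take_succ_cons, List.filter_cons, ← Bool.not_or, pvG, hx]
      simp only [← Bool.not_or] at ih
      by_cases hsk : (x == "" || PySem.Str.startswith x "#") = true
      · simp only [hsk, Bool.not_true, Bool.false_eq_true, if_false, if_true, ih]
      · have hsk' := eq_false_of_ne_true hsk
        simp only [hsk', Bool.false_eq_true, Bool.not_false, if_true, if_false, ih]

-- ===== VERDICT (by name: the statement is the Claim_ definition above) =====
theorem extract_feature_description_py_spec : Claim_equal_extract_feature_description_py := by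
  intro lines si _ hpre
  unfold Spec_extract_feature_description_py extract_feature_description_py
    extract_feature_description_py_alt
  unfold Pre_extract_feature_description_py at hpre
  have h0 : (0:Int) ≤ si + 1 := by omega
  have hk : si + 1 = (((si + 1).toNat : Nat) : Int) := (Int.toNat_of_nonneg h0).symm
  rw [hk]
  dsimp only
  rw [pvALoop_eq_pvG, PySem.List.slice_from_natCast,
    pvBoundary_zero, PySem.List.slice_to_natCast, pvTake_filter_eq_pvG]
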